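-- pv_equiv track=rewrite | github.com/TomasCastroR/Prog2_TP1 | matching.py | diccionario_localidades
-- ===== SOURCE A (Python) =====
-- def diccionario_localidades(lista):
--     localidades = {}
--     for persona in lista:
--         if persona[2] in localidades.keys():
--             localidades[persona[2]].append(persona)
--         else:
--             localidades[persona[2]] = [persona]
--     return localidades
-- ===== SOURCE B (Python) =====
-- def diccionario_localidades(lista):
--     uniques = list(dict.fromkeys(p[2] for p in lista))
--     return {loc: [p for p in lista if p[2] == loc] for loc in uniques}
-- ===== Notes on version B (the rewrite author's own statement) =====
-- stated objective: alternative
-- what changed: Replaces the single incremental dict-grouping pass with a two-phase strategy: collect the distinct locality keys in first-appearance order, then build each group by filtering the whole list once per key.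
import Mathlib
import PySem

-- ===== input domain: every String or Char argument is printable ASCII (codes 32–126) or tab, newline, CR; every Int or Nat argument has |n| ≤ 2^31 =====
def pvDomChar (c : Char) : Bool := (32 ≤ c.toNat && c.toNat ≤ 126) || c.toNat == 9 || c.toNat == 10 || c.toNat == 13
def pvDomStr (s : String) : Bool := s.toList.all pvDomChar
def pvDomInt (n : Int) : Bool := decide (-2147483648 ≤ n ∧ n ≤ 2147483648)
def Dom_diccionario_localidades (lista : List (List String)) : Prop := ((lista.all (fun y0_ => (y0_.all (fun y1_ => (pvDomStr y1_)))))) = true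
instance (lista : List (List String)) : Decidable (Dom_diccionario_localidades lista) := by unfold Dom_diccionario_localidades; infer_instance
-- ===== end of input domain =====

-- Port B changes the structure: A builds the grouping dict in one incremental pass;
-- B first collects the distinct locality keys in first-appearance order, then filters the whole list once per key.

-- ===== PORT A =====
-- persona[2]: Pre_ guarantees the index is in range, so the .getD "" default is never used inside Pre_.
def diccionario_localidades (lista : List (List String)) : List (String × List (List String)) :=
  (lista.foldl (fun localidades persona =>
      let k := (PySem.List.pyGet? persona 2).getD ""
      if localidades.contains k then
        localidades.modify k [] (fun xs => xs ++ [persona])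
      else
        localidades.insert k [persona])
    PySem.Dict.empty).items

-- ===== PORT B =====
def diccionario_localidades_alt (lista : List (List String)) : List (String × List (List String)) :=
  let uniques := PySem.List.dedup (lista.map (fun p => (PySem.List.pyGet? p 2).getD ""))
  uniques.map (fun loc => (loc, lista.filter (fun p => (PySem.List.pyGet? p 2).getD "" == loc)))

-- ===== PRECONDITION & SPEC =====
-- Pre_ excludes exactly the inputs where persona[2] raises IndexError in A (a persona with fewer than 3 fields).
def Pre_diccionario_localidades (lista : List (List String)) : Prop :=
  ∀ p ∈ lista, 3 ≤ p.length
instance (lista : List (List String)) : Decidable (Pre_diccionario_localidades lista) := by unfold Pre_diccionario_localidades; infer_instance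

def pvWitness_diccionario_localidades : List (List String) := [["ana", "1", "cordoba"], ["bob", "2", "salta"], ["eva", "3", "cordoba"]]

def Spec_diccionario_localidades (lista : List (List String)) (out : List (String × List (List String))) : Prop := out = diccionario_localidades_alt lista
instance (lista : List (List String)) (out : List (String × List (List String))) : Decidable (Spec_diccionario_localidades lista out) := by unfold Spec_diccionario_localidades; infer_instance

-- ===== CLAIM (what is proved, stated in full; the proofs are below) =====
def Claim_equal_diccionario_localidades : Prop := ∀ (lista : List (List String)), Dom_diccionario_localidades lista → Pre_diccionario_localidades lista → Spec_diccionario_localidades lista (diccionario_localidades lista)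

-- ===== LEMMAS AND PROOFS =====

-- A's two branches are both Dict.modify: on a fresh key, insert k [p] appends (k, [p]) just as modify does.
theorem insert_eq_modify_of_not_contains (d : PySem.Dict String (List (List String)))
    (k : String) (p : List String) (h : d.contains k = false) :
    d.insert k [p] = d.modify k [] (fun xs => xs ++ [p]) := by
  have hany : (d.items.any fun q => q.1 == k) = false := h
  have hf : d.items.find? (fun q => q.1 == k) = none := by
    rw [List.find?_eq_none]
    intro x hx
    simpa using List.any_eq_false.mp hany x hx
  simp [PySem.Dict.insert, PySem.Dict.modify, PySem.Dict.getD, PySem.Dict.get?, hf]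

theorem fold_eq_modify (lista : List (List String)) :
    (lista.foldl (fun localidades persona =>
        let k := (PySem.List.pyGet? persona 2).getD ""
        if localidades.contains k then
          localidades.modify k [] (fun xs => xs ++ [persona])
        else
          localidades.insert k [persona]) PySem.Dict.empty)
    = lista.foldl (fun d p => d.modify ((PySem.List.pyGet? p 2).getD "") [] (fun xs => xs ++ [p]))
        PySem.Dict.empty := by
  apply PySem.List.foldl_congr_mem
  intro d p _
  by_cases h : d.contains ((PySem.List.pyGet? p 2).getD "") = true
  · simp [h]
  · simp only [Bool.not_eq_true] at h
    simp [h, insert_eq_modify_of_not_contains d _ p h]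

-- ===== VERDICT (by name: the statement is the Claim_ definition above) =====
theorem diccionario_localidades_spec : Claim_equal_diccionario_localidades := by
  intro lista _ _
  unfold Spec_diccionario_localidades diccionario_localidades diccionario_localidades_alt
  rw [fold_eq_modify]
  set key : List String → String := fun p => (PySem.List.pyGet? p 2).getD "" with hkey
  have hfold : lista.foldl (fun d p => d.modify (key p) [] (fun xs => xs ++ [p])) PySem.Dict.empty
      = (lista.map (fun p => (key p, p))).foldl
          (fun d q => d.modify q.1 [] (fun xs => xs ++ [q.2])) PySem.Dict.empty := by
    rw [List.foldl_map]
  have hkeys : (lista.foldl (fun d p => d.modify (key p) [] (fun xs => xs ++ [p]))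
        PySem.Dict.empty).keys = PySem.List.dedup (lista.map key) := by
    rw [PySem.Dict.keys_foldl_modify_key lista key [] (fun _ p xs => xs ++ [p])]
    simp [PySem.Set.update, PySem.Set.ofList_eq_foldl, PySem.Dict.keys, PySem.Dict.empty]
  have hnodup : (lista.foldl (fun d p => d.modify (key p) [] (fun xs => xs ++ [p]))
        PySem.Dict.empty).keys.Nodup := by
    rw [hkeys]; exact PySem.List.nodup_dedup _
  rw [PySem.Dict.items_eq_map_keys _ hnodup [], hkeys]
  apply List.map_congr_left
  intro loc _
  have hg : (lista.foldl (fun d p => d.modify (key p) [] (fun xs => xs ++ [p]))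
        PySem.Dict.empty).getD loc [] = lista.filter (fun p => key p == loc) := by
    rw [hfold, PySem.Dict.getD_foldl_modify_append]
    simp [List.filter_map, Function.comp_def, List.map_map]
  rw [hg]
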